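-- pv_equiv track=rewrite | github.com/FreitasPH/Lista1Python | Q5.py | sum_name
-- ===== SOURCE A (Python) =====
-- def sum_name(list):
--     cont = 0
--     flag = True
--     for i in list:
--         if flag:
--             if i == "sam":
--                 flag = False
--                 cont += 1
--             else:
--                 cont += 1
--     return cont
-- ===== SOURCE B (Python) =====
-- def sum_name(list):
--     # Divide and conquer: split the list in half; a segment reports
--     # (count, found) where count is the number of elements up to and
--     # including the first "sam" (or the segment length if absent) and
--     # found says whether "sam" occurred.  Combine: if the left half
--     # found "sam", its answer stands; otherwise add the right half's.
--     def go(seg):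
--         if not seg:
--             return (0, False)
--         if len(seg) == 1:
--             return (1, seg[0] == "sam")
--         m = len(seg) // 2
--         cl, fl = go(seg[:m])
--         if fl:
--             return (cl, True)
--         cr, fr = go(seg[m:])
--         return (cl + cr, fr)
--     return go(list)[0]
-- ===== Notes on version B (the rewrite author's own statement) =====
-- stated objective: alternative
-- what changed: Replaces A's left-to-right scan carrying a counter and a boolean flag with a divide-and-conquer recursion: each half reports (count, found) and the halves are combined, so there is no sequential mutable state.
import Mathlib
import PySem

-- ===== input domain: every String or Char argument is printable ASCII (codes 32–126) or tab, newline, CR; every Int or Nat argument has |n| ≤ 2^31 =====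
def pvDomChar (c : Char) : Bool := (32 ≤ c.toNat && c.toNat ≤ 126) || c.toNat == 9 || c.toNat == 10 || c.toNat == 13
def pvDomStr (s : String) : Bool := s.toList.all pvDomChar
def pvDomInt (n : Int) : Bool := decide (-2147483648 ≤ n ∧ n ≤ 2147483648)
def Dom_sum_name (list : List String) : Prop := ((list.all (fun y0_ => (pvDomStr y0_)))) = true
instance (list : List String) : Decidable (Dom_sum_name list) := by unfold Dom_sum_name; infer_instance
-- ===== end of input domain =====

-- B replaces A's counter-and-flag scan with a divide-and-conquer recursion combining (count, found) pairs of the two halves.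
-- ===== PORT A =====
-- fold over the list carrying (cont, flag), exactly as A's loop
def sum_name (list : List String) : Int :=
  (list.foldl (fun (st : Int × Bool) i =>
      if st.2 then
        if i = "sam" then (st.1 + 1, false) else (st.1 + 1, st.2)
      else st) (0, true)).1

-- ===== PORT B =====
-- Source B's helper go: seg[:m] / seg[m:] with 0 ≤ m ≤ len(seg) are exactly List.take m / List.drop m
def sum_name_go : List String → Int × Bool
  | [] => (0, false)
  | [x] => (1, x == "sam")
  | x :: y :: rest =>
      let seg := x :: y :: rest
      let m := seg.length / 2
      let l := sum_name_go (seg.take m)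
      if l.2 then l
      else
        let r := sum_name_go (seg.drop m)
        (l.1 + r.1, r.2)
  termination_by seg => seg.length
  decreasing_by
    · simp [List.length_take]; omega
    · simp [List.length_drop]; omega

def sum_name_alt (list : List String) : Int := (sum_name_go list).1

-- ===== PRECONDITION & SPEC =====
def Spec_sum_name (list : List String) (out : Int) : Prop := out = sum_name_alt list
instance (list : List String) (out : Int) : Decidable (Spec_sum_name list out) := by unfold Spec_sum_name; infer_instance

-- ===== CLAIM (what is proved, stated in full; the proofs are below) =====
def Claim_equal_sum_name : Prop := ∀ (list : List String), Dom_sum_name list → Spec_sum_name list (sum_name list)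

-- ===== LEMMAS AND PROOFS =====

-- proof-only sequential characterisation of the count
def pvCnt : List String → Int
  | [] => 0
  | x :: xs => if x = "sam" then 1 else 1 + pvCnt xs

theorem pvCnt_append (l1 l2 : List String) :
    pvCnt (l1 ++ l2) = if l1.contains "sam" then pvCnt l1 else pvCnt l1 + pvCnt l2 := by
  induction l1 with
  | nil => simp [pvCnt]
  | cons x xs ih =>
    by_cases hx : x = "sam"
    · simp [pvCnt, hx]
    · have hc : (x :: xs).contains "sam" = xs.contains "sam" := by
        simp [hx, eq_comm]
      by_cases hxs : "sam" ∈ xs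
      · simp [pvCnt, hx, ih, hxs, Ne.symm hx]
      · simp [pvCnt, hx, ih, hxs, Ne.symm hx]
        ring

theorem pvCnt_take (L : List String) (m : Nat) (h : "sam" ∈ L.take m) :
    pvCnt L = pvCnt (L.take m) := by
  conv_lhs => rw [← List.take_append_drop m L]
  rw [pvCnt_append, if_pos (by simpa using h)]

theorem pvCnt_take_drop (L : List String) (m : Nat) (h : "sam" ∉ L.take m) :
    pvCnt L = pvCnt (L.take m) + pvCnt (L.drop m) := by
  conv_lhs => rw [← List.take_append_drop m L]
  rw [pvCnt_append, if_neg (by simpa using h)]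

theorem sum_name_go_eq (seg : List String) :
    sum_name_go seg = (pvCnt seg, seg.contains "sam") := by
  induction seg using sum_name_go.induct with
  | case1 => simp [sum_name_go, pvCnt]
  | case2 x =>
    by_cases hx : x = "sam"
    · simp [sum_name_go, pvCnt, hx]
    · simp [sum_name_go, pvCnt, hx, Ne.symm hx]
  | case3 x y rest seg m l hl ih1 =>
    simp only [seg, m, l, List.length_cons] at hl ih1
    rw [sum_name_go]
    simp only [List.length_cons]
    rw [ih1]
    rw [ih1] at hl
    rw [if_pos hl]
    have hmem : "sam" ∈ (x :: y :: rest).take ((rest.length + 1 + 1) / 2) := by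
      simpa using hl
    have h1 := (pvCnt_take (x :: y :: rest) ((rest.length + 1 + 1) / 2) hmem).symm
    have h2 : ((x :: y :: rest).take ((rest.length + 1 + 1) / 2)).contains "sam"
        = (x :: y :: rest).contains "sam" := by
      simp [hmem, List.mem_of_mem_take hmem]
    rw [Prod.ext_iff]
    exact ⟨h1, h2⟩
  | case4 x y rest seg m l hl ih1 ih2 =>
    simp only [seg, m, l, List.length_cons] at hl ih1 ih2
    rw [sum_name_go]
    simp only [List.length_cons]
    rw [ih1, ih2]
    rw [ih1] at hl
    rw [if_neg hl]
    have hmem : "sam" ∉ (x :: y :: rest).take ((rest.length + 1 + 1) / 2) := by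
      simpa using hl
    have h1 := (pvCnt_take_drop (x :: y :: rest) ((rest.length + 1 + 1) / 2) hmem).symm
    have hiff : ("sam" ∈ (x :: y :: rest)) ↔
        ("sam" ∈ (x :: y :: rest).drop ((rest.length + 1 + 1) / 2)) := by
      constructor
      · intro h
        have h' : "sam" ∈ (x :: y :: rest).take ((rest.length + 1 + 1) / 2) ++
            (x :: y :: rest).drop ((rest.length + 1 + 1) / 2) := by
          rw [List.take_append_drop]; exact h
        exact (List.mem_append.mp h').resolve_left hmem
      · intro h; exact List.mem_of_mem_drop h
    have h2 : ((x :: y :: rest).drop ((rest.length + 1 + 1) / 2)).contains "sam"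
        = (x :: y :: rest).contains "sam" := by
      rw [Bool.eq_iff_iff]
      simpa using hiff.symm
    rw [Prod.ext_iff]
    exact ⟨h1, h2⟩

-- loop invariant: A's fold from counter c with flag true yields c plus the sequential count
theorem sum_name_dead (l : List String) (c : Int) :
    (l.foldl (fun (st : Int × Bool) i =>
      if st.2 then
        if i = "sam" then (st.1 + 1, false) else (st.1 + 1, st.2)
      else st) (c, false)).1 = c := by
  induction l generalizing c with
  | nil => simp
  | cons y ys ih => simpa using ih c

theorem sum_name_loop (list : List String) (c : Int) :
    (list.foldl (fun (st : Int × Bool) i =>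
        if st.2 then
          if i = "sam" then (st.1 + 1, false) else (st.1 + 1, st.2)
        else st) (c, true)).1 = c + pvCnt list := by
  induction list generalizing c with
  | nil => simp [pvCnt]
  | cons x xs ih =>
    by_cases hx : x = "sam"
    · simp [hx, pvCnt, sum_name_dead]
    · simp only [List.foldl_cons]
      norm_num [hx]
      rw [ih (c + 1), pvCnt]
      simp [hx]; ring

-- ===== VERDICT (by name: the statement is the Claim_ definition above) =====
theorem sum_name_spec : Claim_equal_sum_name := by
  intro list _
  show _ = _
  rw [sum_name_alt, sum_name_go_eq]
  simpa [sum_name] using sum_name_loop list 0
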